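-- pv_equiv track=rewrite | github.com/briangalindoherbert/gs_tweet | gs_nlp.py | count_tweets_for_word
-- ===== SOURCE A (Python) =====
-- from collections import OrderedDict
--
-- def count_tweets_for_word(word_tf: dict):
--     """
--     identifies number of Tweets ('docs') in which target word occurs
--     :param word_tf:
--     :return: OrderedDict descending order of key=word : value=count Tweets where word appears
--     """
--     docs_per_word = {}
--     for sent, tf in word_tf.items():
--         for word in tf:
--             if word in docs_per_word:
--                 docs_per_word[word] += 1
--             else:
--                 docs_per_word[word] = 1
--
--     w_descend: list = sorted(docs_per_word, key=lambda x: docs_per_word.get(x), reverse=True)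
--     w_docs: OrderedDict = {k: docs_per_word[k] for k in w_descend}
--
--     return w_docs
-- ===== SOURCE B (Python) =====
-- from collections import Counter
--
--
-- def count_tweets_for_word(word_tf: dict):
--     """Bucket/counting sort instead of comparison sort: one Counter pass,
--     then words are distributed into per-count buckets and emitted from the
--     highest count down, which preserves the stable (first-appearance) order."""
--     counts = Counter(word for tf in word_tf.values() for word in tf)
--     if not counts:
--         return {}
--     maxc = max(counts.values())
--     buckets = {}
--     for word, c in counts.items():
--         buckets.setdefault(c, []).append(word)
--     out = {}
--     for c in range(maxc, 0, -1):
--         for word in buckets.get(c, []):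
--             out[word] = c
--     return out
-- ===== Notes on version B (the rewrite author's own statement) =====
-- stated objective: alternative
-- what changed: The counting pass becomes a single Counter over the flattened words, and the comparison-based stable sort (sorted with reverse=True) is replaced by a counting/bucket sort: words are grouped into per-count buckets in insertion order and emitted from the maximum count down to 1.
import Mathlib
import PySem

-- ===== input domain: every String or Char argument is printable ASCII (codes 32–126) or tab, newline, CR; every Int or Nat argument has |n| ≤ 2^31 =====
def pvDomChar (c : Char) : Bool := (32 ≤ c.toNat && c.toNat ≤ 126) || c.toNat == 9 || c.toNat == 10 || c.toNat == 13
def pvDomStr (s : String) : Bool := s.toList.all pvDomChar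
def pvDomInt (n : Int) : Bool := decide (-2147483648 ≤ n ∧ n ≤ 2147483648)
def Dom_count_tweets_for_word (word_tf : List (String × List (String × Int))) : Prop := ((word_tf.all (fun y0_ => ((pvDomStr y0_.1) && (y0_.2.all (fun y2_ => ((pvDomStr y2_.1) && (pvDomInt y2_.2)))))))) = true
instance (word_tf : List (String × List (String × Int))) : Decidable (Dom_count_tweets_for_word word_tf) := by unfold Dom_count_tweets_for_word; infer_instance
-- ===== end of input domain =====

-- B replaces A's comparison-based stable sort by a counting/bucket sort (alternative decomposition, same results).

-- ===== PORT A =====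
def count_tweets_for_word (word_tf : List (String × List (String × Int))) : List (String × Int) :=
  -- docs_per_word: nested dict-building loop; 'docs_per_word[word] += 1' is an in-place
  -- overwrite of an existing key, ported as Dict.insert of getD+1 (key present, so getD is d[word]).
  let d : PySem.Dict String Int := word_tf.foldl
    (fun d p => p.2.foldl
      (fun d wp =>
        if d.contains wp.1 then d.insert wp.1 (d.getD wp.1 0 + 1)
        else d.insert wp.1 1) d)
    PySem.Dict.empty
  -- sorted(docs_per_word, key=docs_per_word.get, reverse=True): every sorted element is a key
  -- of docs_per_word, so .get is ported as getD _ 0 (never the default)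
  let w_descend := PySem.List.sorted d.keys (fun x => d.getD x 0) true
  -- {k: docs_per_word[k] for k in w_descend}: keys are distinct, so the dict is the pair list in order
  w_descend.map (fun k => (k, d.getD k 0))

-- ===== PORT B =====
def count_tweets_for_word_alt (word_tf : List (String × List (String × Int))) : List (String × Int) :=
  -- Counter(word for tf in word_tf.values() for word in tf)
  let words := word_tf.flatMap (fun p => p.2.map Prod.fst)
  let counts := PySem.Dict.counter words
  -- 'if not counts: return {}' then 'maxc = max(counts.values())': counts is empty exactly
  -- when max? of its values is none, so the two lines are ported as one match
  match PySem.List.max? counts.values (fun v => v) with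
  | none => []
  | some maxc =>
    let buckets : PySem.Dict Int (List String) :=
      counts.items.foldl (fun b p => b.modify p.2 [] (· ++ [p.1])) PySem.Dict.empty
    (PySem.List.pyRange maxc 0 (-1)).foldl
      (fun out c => (buckets.getD c []).foldl (fun out w => out ++ [(w, c)]) out) []

-- ===== PRECONDITION & SPEC =====
-- Pre_ excludes association lists with duplicate outer (sentence) or inner (word) keys: such
-- lists do not represent a Python dict (a real dict collapses duplicates, which both Pythons
-- receive), so they are outside the function's input space under the dict-as-assoc-list convention.
def Pre_count_tweets_for_word (word_tf : List (String × List (String × Int))) : Prop :=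
  (word_tf.map Prod.fst).Nodup ∧ ∀ p ∈ word_tf, (p.2.map Prod.fst).Nodup
instance (word_tf : List (String × List (String × Int))) : Decidable (Pre_count_tweets_for_word word_tf) := by unfold Pre_count_tweets_for_word; infer_instance
def pvWitness_count_tweets_for_word : (List (String × List (String × Int))) :=
  [("s1", [("a", 2), ("b", 1)]), ("s2", [("a", 3)])]

def Spec_count_tweets_for_word (word_tf : List (String × List (String × Int))) (out : List (String × Int)) : Prop := out = count_tweets_for_word_alt word_tf
instance (word_tf : List (String × List (String × Int))) (out : List (String × Int)) : Decidable (Spec_count_tweets_for_word word_tf out) := by unfold Spec_count_tweets_for_word; infer_instance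

-- ===== CLAIM (what is proved, stated in full; the proofs are below) =====
def Claim_equal_count_tweets_for_word : Prop := ∀ (word_tf : List (String × List (String × Int))), Dom_count_tweets_for_word word_tf → Pre_count_tweets_for_word word_tf → Spec_count_tweets_for_word word_tf (count_tweets_for_word word_tf)

-- ===== LEMMAS AND PROOFS =====

theorem pv_insertBy_cons {α : Type} (b : α → α → Bool) (x y : α) (ys : List α) :
    PySem.List.insertBy b x (y :: ys) =
      if b x y then x :: y :: ys else y :: PySem.List.insertBy b x ys := rfl

theorem pv_insertBy_skip {α : Type} (b : α → α → Bool) (x : α) (pre ys : List α)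
    (h : ∀ y ∈ pre, b x y = false) :
    PySem.List.insertBy b x (pre ++ ys) = pre ++ PySem.List.insertBy b x ys := by
  induction pre with
  | nil => simp
  | cons z zs ih =>
    simp only [List.cons_append, pv_insertBy_cons, h z (by simp)]
    simp only [Bool.false_eq_true, if_false, List.cons.injEq, true_and]
    exact ih (fun y hy => h y (by simp [hy]))

theorem pv_insertBy_all {α : Type} (b : α → α → Bool) (x : α) (ys : List α)
    (h : ∀ y ∈ ys, b x y = true) :
    PySem.List.insertBy b x ys = x :: ys := by
  cases ys with
  | nil => rfl
  | cons z zs => simp [pv_insertBy_cons, h z (by simp)]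

theorem pv_insertBy_flatMap_filter {α : Type} (f : α → Int) (x : α) (ks : List α) :
    ∀ L : List Int, L.Pairwise (fun a b => b < a) → f x ∈ L →
    PySem.List.insertBy (fun a b => decide (f b < f a)) x
        (L.flatMap (fun c => ks.filter (fun k => f k == c)))
      = L.flatMap (fun c => (ks ++ [x]).filter (fun k => f k == c)) := by
  intro L
  induction L with
  | nil => intro _ h; simp at h
  | cons c L ih =>
    intro hp hx
    have hlt : ∀ b ∈ L, b < c := fun b hb => (List.pairwise_cons.mp hp).1 b hb
    simp only [List.flatMap_cons, List.filter_append]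
    by_cases hxc : f x = c
    · rw [pv_insertBy_skip _ _ _ _ (by
        intro y hy
        have : f y = c := by
          have := (List.mem_filter.mp hy).2; simpa using this
        simp [this, hxc])]
      rw [pv_insertBy_all _ _ _ (by
        intro y hy
        rcases List.mem_flatMap.mp hy with ⟨c', hc', hy'⟩
        have hfy : f y = c' := by
          have := (List.mem_filter.mp hy').2; simpa using this
        simp [hfy, hxc]
        exact hlt c' hc')]
      have hrest : L.flatMap (fun c' => ks.filter (fun k => f k == c') ++ List.filter (fun k => f k == c') [x])
          = L.flatMap (fun c' => ks.filter (fun k => f k == c')) := by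
        apply List.flatMap_congr
        intro c' hc'
        have : ¬ (f x = c') := by
          have := hlt c' hc'; omega
        have h1 : (f x == c') = false := by simp [this]
        simp [List.filter, h1]
      rw [hrest]
      simp [List.filter, hxc]
  -- goal shape: filter_c ks ++ x :: rest = (filter_c ks ++ [x]) ++ rest
    · have hxL : f x ∈ L := by
        rcases List.mem_cons.mp hx with h | h
        · exact absurd h hxc
        · exact h
      have hflt : f x < c := hlt _ hxL
      rw [pv_insertBy_skip _ _ _ _ (by
        intro y hy
        have hfy : f y = c := by
          have := (List.mem_filter.mp hy).2; simpa using this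
        simp [hfy]; omega)]
      rw [ih (List.pairwise_cons.mp hp).2 hxL]
      have h2 : (f x == c) = false := by simp [hxc]
      have : List.filter (fun k => f k == c) [x] = [] := by simp [List.filter, h2]
      simp [this]

theorem pv_sorted_rev_eq_flatMap_filter {α : Type} (f : α → Int) (L : List Int)
    (hL : L.Pairwise (fun a b => b < a)) :
    ∀ ks : List α, (∀ k ∈ ks, f k ∈ L) →
    PySem.List.sorted ks f true = L.flatMap (fun c => ks.filter (fun k => f k == c)) := by
  intro ks
  induction ks using List.reverseRecOn with
  | nil => intro _; simp [(PySem.List.sorted_eq_nil_iff ([] : List α) f true).mpr rfl]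
  | append_singleton ks x ih =>
    intro hmem
    have hks : ∀ k ∈ ks, f k ∈ L := fun k hk => hmem k (by simp [hk])
    have hx : f x ∈ L := hmem x (by simp)
    rw [PySem.List.sorted_rev_eq_foldl_insertBy, List.foldl_append]
    simp only [List.foldl_cons, List.foldl_nil]
    rw [← PySem.List.sorted_rev_eq_foldl_insertBy, ih hks]
    exact pv_insertBy_flatMap_filter f x ks L hL hx

theorem pv_foldl_flatMap {α β γ : Type} (g : α → List β) (f : γ → β → γ) (l : List α) (init : γ) :
    (l.flatMap g).foldl f init = l.foldl (fun acc x => (g x).foldl f acc) init := by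
  induction l generalizing init with
  | nil => rfl
  | cons a l ih => simp [List.flatMap_cons, List.foldl_append, ih]

theorem pv_d_eq_counter (word_tf : List (String × List (String × Int))) :
    word_tf.foldl (fun d p => p.2.foldl (fun d wp =>
        if d.contains wp.1 then d.insert wp.1 (d.getD wp.1 0 + 1)
        else d.insert wp.1 1) d) PySem.Dict.empty
      = PySem.Dict.counter (word_tf.flatMap (fun p => p.2.map Prod.fst)) := by
  have hstep : (fun (d : PySem.Dict String Int) (wp : String × Int) =>
      if d.contains wp.1 then d.insert wp.1 (d.getD wp.1 0 + 1) else d.insert wp.1 1)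
    = fun d wp => d.insert wp.1 (d.getD wp.1 0 + 1) := by
    funext d wp
    by_cases h : d.contains wp.1
    · simp [h]
    · have h0 : d.get? wp.1 = none :=
        (PySem.Dict.get?_eq_none_iff_contains d wp.1).mpr (by simpa using h)
      simp [h, PySem.Dict.getD, h0]
  rw [hstep, ← PySem.Dict.foldl_insert_getD_add_one_eq_counter, pv_foldl_flatMap]
  congr 1
  funext d p
  rw [List.foldl_map]

theorem pv_dict_getD_empty {κ ν : Type} [BEq κ] (c : κ) (dflt : ν) :
    (PySem.Dict.empty : PySem.Dict κ ν).getD c dflt = dflt := rfl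

theorem pv_buckets_getD (words : List String) (c : Int) :
    ((PySem.Dict.counter words).items.foldl
        (fun b p => b.modify p.2 [] (· ++ [p.1])) PySem.Dict.empty).getD c []
      = (PySem.Set.ofList words).filter (fun k => ((words.count k : Int)) == c) := by
  rw [PySem.Dict.items_counter, List.foldl_map]
  have h2 : (PySem.Set.ofList words).foldl
      (fun b k => PySem.Dict.modify b ((words.count k : Int)) [] (· ++ [k])) PySem.Dict.empty
    = ((PySem.Set.ofList words).map (fun k => (((words.count k : Int)), k))).foldl
        (fun d p => d.modify p.1 [] (· ++ [p.2])) PySem.Dict.empty := by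
    rw [List.foldl_map]
  rw [show (fun (b : PySem.Dict Int (List String)) (k : String) =>
        PySem.Dict.modify b ((k, (words.count k : Int)).2) [] (· ++ [(k, (words.count k : Int)).1]))
      = fun b k => PySem.Dict.modify b ((words.count k : Int)) [] (· ++ [k]) from rfl, h2,
     PySem.Dict.getD_foldl_modify_append, pv_dict_getD_empty, List.filter_map, List.map_map]
  simp [Function.comp_def]

theorem pv_out_foldl (L : List Int) (bucket : Int → List String) :
    L.foldl (fun out c => (bucket c).foldl (fun out w => out ++ [(w, c)]) out)
        ([] : List (String × Int))
      = L.flatMap (fun c => (bucket c).map (fun w => (w, c))) := by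
  have h : (fun (out : List (String × Int)) c =>
        (bucket c).foldl (fun out w => out ++ [(w, c)]) out)
      = fun out c => out ++ (bucket c).map (fun w => (w, c)) := by
    funext out c
    rw [PySem.List.foldl_append_eq_flatMap (fun w => [(w, c)]), ← List.map_eq_flatMap]
  rw [h, PySem.List.foldl_append_eq_flatMap]
  simp

theorem pv_pyRange_neg_one_pairwise (a b : Int) :
    (PySem.List.pyRange a b (-1)).Pairwise (fun x y => y < x) := by
  rw [PySem.List.pyRange_neg_one_eq_reverse, PySem.List.pyRange_one, List.pairwise_reverse,
      List.pairwise_map]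
  exact (List.pairwise_lt_range).imp (by intro i j h; omega)

-- ===== VERDICT (by name: the statement is the Claim_ definition above) =====
theorem count_tweets_for_word_spec : Claim_equal_count_tweets_for_word := by
  intro word_tf _ _
  show count_tweets_for_word word_tf = count_tweets_for_word_alt word_tf
  simp only [count_tweets_for_word, count_tweets_for_word_alt]
  rw [pv_d_eq_counter]
  set words := word_tf.flatMap (fun p => p.2.map Prod.fst) with hw
  rw [PySem.Dict.keys_counter]
  simp only [PySem.Dict.getD_counter]
  have hvals : (PySem.Dict.counter words).values
      = (PySem.Set.ofList words).map (fun k => ((words.count k : Int))) := by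
    simp [PySem.Dict.values, PySem.Dict.items_counter]
  rw [hvals]
  cases hmax : PySem.List.max? ((PySem.Set.ofList words).map (fun k => ((words.count k : Int))))
      (fun v => v) with
  | none =>
    have hnil : PySem.Set.ofList words = [] :=
      List.map_eq_nil_iff.mp ((PySem.List.max?_eq_none_iff _ _).mp hmax)
    rw [hnil, (PySem.List.sorted_eq_nil_iff _ _ _).mpr rfl]
    simp
  | some maxc =>
    dsimp only
    have hub : ∀ k ∈ PySem.Set.ofList words, ((words.count k : Int)) ≤ maxc := by
      intro k hk
      exact PySem.List.max?_isMax hmax _ (List.mem_map_of_mem hk)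
    have hL : (PySem.List.pyRange maxc 0 (-1)).Pairwise (fun x y => y < x) :=
      pv_pyRange_neg_one_pairwise maxc 0
    have hmem : ∀ k ∈ PySem.Set.ofList words,
        ((words.count k : Int)) ∈ PySem.List.pyRange maxc 0 (-1) := by
      intro k hk
      rw [PySem.List.mem_pyRange_neg_one]
      constructor
      · have : 0 < words.count k :=
          List.count_pos_iff.mpr ((PySem.Set.mem_ofList words k).mp hk)
        exact_mod_cast this
      · exact hub k hk
    rw [pv_sorted_rev_eq_flatMap_filter _ _ hL _ hmem, pv_out_foldl]
    simp only [pv_buckets_getD, List.map_flatMap]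
    apply List.flatMap_congr
    intro c _
    apply List.map_congr_left
    intro k hk
    have : ((words.count k : Int)) = c := by
      have := (List.mem_filter.mp hk).2; simpa using this
    simp [this]
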